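-- pv_equiv track=rewrite | github.com/Ifinitysystem/cmpsc | PS4.py | words_with_vowels
-- ===== SOURCE A (Python) =====
-- def is_vowel(ch):
--     return ch == 'a' or ch == 'e' or ch == 'i' or ch == 'o' or ch == 'u' or \
--            ch == 'A' or ch == 'E' or ch == 'I' or ch == 'O' or ch == 'U'
--
-- def words_with_vowels(text):
--     result = []
--     word = ''
--     for i in range(len(text)):
--         ch = text[i]
--         if ('a' <= ch <= 'z') or ('A' <= ch <= 'Z'):
--             word += ch
--         else:
--             if word != '':
--                 has_vowel = False
--                 for j in range(len(word)):
--                     if is_vowel(word[j]):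
--                         has_vowel = True
--                         break
--                 if has_vowel:
--                     result.append(word)
--                 word = ''
--     if word != '':
--         has_vowel = False
--         for j in range(len(word)):
--             if is_vowel(word[j]):
--                 has_vowel = True
--                 break
--         if has_vowel:
--             result.append(word)
--
--     return result
-- ===== SOURCE B (Python) =====
-- def words_with_vowels(text):
--     # Two-pointer tokenization: slice out each maximal letter-run at once,
--     # then keep the runs containing a vowel.
--     result = []
--     n = len(text)
--     i = 0
--     while i < n:
--         ch = text[i]
--         if ('a' <= ch <= 'z') or ('A' <= ch <= 'Z'):
--             j = i
--             while j < n: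
--                 c = text[j]
--                 if ('a' <= c <= 'z') or ('A' <= c <= 'Z'):
--                     j += 1
--                 else:
--                     break
--             word = text[i:j]
--             if any(c in 'aeiouAEIOU' for c in word):
--                 result.append(word)
--             i = j
--         else:
--             i += 1
--     return result
-- ===== Notes on version B (the rewrite author's own statement) =====
-- stated objective: alternative
-- what changed: Replaced A's char-by-char accumulator state machine (build word, flush on non-letter, duplicated post-loop flush, early-break vowel scan) with a two-pointer tokenizer that slices out each maximal letter-run in one step and then filters runs by vowel membership.
import Mathlib
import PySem

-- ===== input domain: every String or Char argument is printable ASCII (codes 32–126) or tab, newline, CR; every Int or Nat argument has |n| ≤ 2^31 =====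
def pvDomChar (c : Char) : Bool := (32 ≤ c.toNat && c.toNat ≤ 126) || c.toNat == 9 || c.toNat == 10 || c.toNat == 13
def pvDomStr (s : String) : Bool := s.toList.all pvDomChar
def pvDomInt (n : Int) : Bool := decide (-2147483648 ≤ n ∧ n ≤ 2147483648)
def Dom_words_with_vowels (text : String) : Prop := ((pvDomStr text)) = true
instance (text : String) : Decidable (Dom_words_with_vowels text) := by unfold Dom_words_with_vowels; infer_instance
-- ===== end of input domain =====

-- B replaces A's char-accumulator state machine by a two-pointer tokenizer
-- (slice out each maximal letter-run, then filter runs by vowel membership); alternative, same cost.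

-- ===== PORT A =====

-- is_vowel(ch)
def pvIsVowel (ch : Char) : Bool :=
  ch == 'a' || ch == 'e' || ch == 'i' || ch == 'o' || ch == 'u' ||
  ch == 'A' || ch == 'E' || ch == 'I' || ch == 'O' || ch == 'U'

-- ('a' <= ch <= 'z') or ('A' <= ch <= 'Z')
def pvIsLetter (ch : Char) : Bool :=
  ('a' ≤ ch && ch ≤ 'z') || ('A' ≤ ch && ch ≤ 'Z')

-- the inner "for j … if is_vowel: has_vowel = True; break" loop
def pvAHasVowel : List Char → Bool
  | [] => false
  | c :: t => if pvIsVowel c then true else pvAHasVowel t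

-- A's main loop: state (result, word), flush word on non-letter
def pvALoop : List Char → List String → List Char → List String × List Char
  | [], res, word => (res, word)
  | ch :: rest, res, word =>
      if pvIsLetter ch then pvALoop rest res (word ++ [ch])
      else if word ≠ [] then
        pvALoop rest (if pvAHasVowel word then res ++ [String.mk word] else res) []
      else pvALoop rest res word

def words_with_vowels (text : String) : List String :=
  let (res, word) := pvALoop text.toList [] []
  -- post-loop flush
  if word ≠ [] then
    (if pvAHasVowel word then res ++ [String.mk word] else res)
  else res

-- ===== PORT B =====

-- Source B's own letter test ('a' <= c <= 'z') or ('A' <= c <= 'Z')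
def pvIsLetterB (ch : Char) : Bool :=
  ('a' ≤ ch && ch ≤ 'z') || ('A' ≤ ch && ch ≤ 'Z')

def pvVowelsB : List Char := ['a', 'e', 'i', 'o', 'u', 'A', 'E', 'I', 'O', 'U']

-- the inner while loop scanning j forward over letters + the slice text[i:j]
-- is exactly takeWhile / dropWhile of the letter predicate
def pvTokens : List Char → List (List Char)
  | [] => []
  | c :: rest =>
      if pvIsLetterB c then
        (List.takeWhile pvIsLetterB (c :: rest)) :: pvTokens (List.dropWhile pvIsLetterB rest)
      else pvTokens rest
  termination_by cs => cs.length
  decreasing_by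
    · simpa using Nat.lt_succ_of_le (List.length_dropWhile_le pvIsLetterB rest)
    · simp

def words_with_vowels_alt (text : String) : List String :=
  ((pvTokens text.toList).filter (fun w => w.any (fun c => pvVowelsB.contains c))).map String.mk

-- ===== PRECONDITION & SPEC =====
def Spec_words_with_vowels (text : String) (out : List String) : Prop := out = words_with_vowels_alt text
instance (text : String) (out : List String) : Decidable (Spec_words_with_vowels text out) := by unfold Spec_words_with_vowels; infer_instance

-- ===== CLAIM (what is proved, stated in full; the proofs are below) =====
def Claim_equal_words_with_vowels : Prop := ∀ (text : String), Dom_words_with_vowels text → Spec_words_with_vowels text (words_with_vowels text)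

-- ===== LEMMAS AND PROOFS =====

-- the two letter tests are definitionally the same predicate
theorem pvLetter_eq : pvIsLetter = pvIsLetterB := rfl

-- the two vowel tests agree
theorem pvVowel_eq (c : Char) : pvIsVowel c = pvVowelsB.contains c := by
  simp only [pvIsVowel, pvVowelsB, List.contains, List.elem]
  repeat' split
  all_goals simp_all

theorem pvAHasVowel_eq (w : List Char) : pvAHasVowel w = w.any (fun c => pvVowelsB.contains c) := by
  induction w with
  | nil => rfl
  | cons c t ih =>
    simp only [pvAHasVowel, List.any_cons]
    rw [← pvVowel_eq, ← ih]
    cases hv : pvIsVowel c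
    · simp [pvAHasVowel, hv]
    · simp

-- A's tokenization, abstracted: word is the accumulated letters so far
def pvTokAux (word : List Char) : List Char → List (List Char)
  | [] => if word = [] then [] else [word]
  | c :: rest =>
      if pvIsLetter c then pvTokAux (word ++ [c]) rest
      else if word = [] then pvTokAux [] rest
      else word :: pvTokAux [] rest

theorem pvTokAux_eq (cs : List Char) : ∀ word : List Char,
    pvTokAux word cs =
      if word = [] then pvTokens cs
      else (word ++ List.takeWhile pvIsLetterB cs) :: pvTokens (List.dropWhile pvIsLetterB cs) := by
  induction cs with
  | nil =>
    intro word
    by_cases h : word = [] <;> simp [pvTokAux, pvTokens, h]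
  | cons c rest ih =>
    intro word
    by_cases hl : pvIsLetter c = true
    · by_cases h : word = []
      · simp [pvTokAux, hl, h, ih, pvTokens, ← pvLetter_eq]
      · have : word ++ [c] ≠ [] := by simp
        simp [pvTokAux, hl, h, ih, this, ← pvLetter_eq]
    · by_cases h : word = []
      · simp [pvTokAux, hl, h, ih, pvTokens, ← pvLetter_eq]
      · simp [pvTokAux, hl, h, ih, pvTokens, ← pvLetter_eq]

-- the loop invariant: finishing A's loop from any state equals filtering pvTokAux's tokens
theorem pvALoop_eq (cs : List Char) : ∀ (res : List String) (word : List Char),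
    (let (r, w) := pvALoop cs res word
     if w ≠ [] then (if pvAHasVowel w then r ++ [String.mk w] else r) else r)
    = res ++ ((pvTokAux word cs).filter (fun w => pvAHasVowel w)).map String.mk := by
  induction cs with
  | nil =>
    intro res word
    by_cases h : word = [] <;> by_cases hv : pvAHasVowel word = true <;>
      simp [pvALoop, pvTokAux, h, hv]
  | cons c rest ih =>
    intro res word
    by_cases hl : pvIsLetter c = true
    · simp [pvALoop, pvTokAux, hl, ih]
    · by_cases h : word = []
      · simp [pvALoop, pvTokAux, hl, h, ih]
      · by_cases hv : pvAHasVowel word = true <;>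
          simp [pvALoop, pvTokAux, hl, h, hv, ih]

-- ===== VERDICT (by name: the statement is the Claim_ definition above) =====
theorem words_with_vowels_spec : Claim_equal_words_with_vowels := by
  intro text _
  unfold Spec_words_with_vowels words_with_vowels words_with_vowels_alt
  have h := pvALoop_eq text.toList [] []
  rw [pvTokAux_eq] at h
  simp only [List.nil_append, if_true] at h
  rw [List.filter_congr (fun w _ => pvAHasVowel_eq w)] at h
  rcases he : pvALoop text.toList [] [] with ⟨r, w⟩
  rw [he] at h
  simpa using h
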